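-- pv_equiv track=rewrite | github.com/akimov246/leetcode | 908. Smallest Range I.py | smallestRangeI
-- ===== SOURCE A (Python) =====
-- def smallestRangeI(nums: list[int], k: int) -> int:
--
--     max_ = max(nums)
--     min_ = min(nums)
--
--     if k == 0:
--         return max_ - min_
--
--     target = (max_ + min_) // 2
--     k_range = set(range(-k, k + 1))
--
--     for i in range(len(nums)):
--         while (diff := target - nums[i]) not in k_range:
--             if diff > k:
--                 target = nums[i] + k
--             else:
--                 target = nums[i] - k
--
--         nums[i] += diff
--
--     return max(nums) - min(nums)
-- ===== SOURCE B (Python) =====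
-- def smallestRangeI(nums: list[int], k: int) -> int:
--     # Closed form: every element can be moved into [x-k, x+k]; the best common
--     # meeting range shrinks max-min by 2k, floored at 0. (Return value only:
--     # A mutates nums in place, B does not.)
--     return max(max(nums) - min(nums) - 2 * k, 0)
-- ===== Notes on version B (the rewrite author's own statement) =====
-- stated objective: faster
-- what changed: Replaces A's target-adjusting loop (which builds a set of 2k+1 allowed differences and rewrites every element in place) with the closed form max(0, max(nums)-min(nums)-2k); equivalence is about the return value only, since A mutates nums and B does not.
import Mathlib
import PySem

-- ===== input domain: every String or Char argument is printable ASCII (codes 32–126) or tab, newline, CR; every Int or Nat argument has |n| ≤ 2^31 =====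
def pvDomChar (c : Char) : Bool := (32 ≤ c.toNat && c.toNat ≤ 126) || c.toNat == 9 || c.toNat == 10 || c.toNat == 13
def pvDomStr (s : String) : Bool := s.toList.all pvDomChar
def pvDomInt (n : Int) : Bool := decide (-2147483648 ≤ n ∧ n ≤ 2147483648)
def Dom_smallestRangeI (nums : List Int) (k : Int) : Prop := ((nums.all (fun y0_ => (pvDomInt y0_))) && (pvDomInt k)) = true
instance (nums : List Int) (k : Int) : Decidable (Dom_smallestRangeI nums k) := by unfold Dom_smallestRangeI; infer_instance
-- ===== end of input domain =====

-- B replaces A's target-adjusting rewrite loop with the closed form max(0, max-min-2k);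
-- return value only: A mutates nums in place, B does not.

-- ===== PORT A =====
-- the while loop: under Pre_ (0 ≤ k) it runs at most twice (after a reset, diff = ±k is
-- in range), so fuel 2 is exact there; on fuel exhaustion we return the current target
-- (unreachable inside Pre_; for k < 0 Python diverges, excluded by Pre_).
def pyWhileA (fuel : Nat) (x target k : Int) : Int :=
  match fuel with
  | 0 => target
  | Nat.succ n =>
    let diff := target - x
    if diff ∈ PySem.List.pyRange (-k) (k + 1) 1 then target
    else pyWhileA n x (if diff > k then x + k else x - k) k

-- for i in range(len(nums)): while …; nums[i] += diff   — structural recursion over the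
-- same state (the list being rewritten in place, and target)
def loopA (k : Int) : List Int → Int → (List Int × Int)
  | [], target => ([], target)
  | x :: rest, target =>
    let t' := pyWhileA 2 x target k
    let x' := x + (t' - x)          -- nums[i] += diff
    let r := loopA k rest t'
    (x' :: r.1, r.2)

def smallestRangeI (nums : List Int) (k : Int) : Int :=
  match PySem.List.max? nums (fun y => y), PySem.List.min? nums (fun y => y) with
  | some max_, some min_ =>
    if k = 0 then max_ - min_
    else
      let target := PySem.Int.floordiv (max_ + min_) 2
      let nums' := (loopA k nums target).1
      match PySem.List.max? nums' (fun y => y), PySem.List.min? nums' (fun y => y) with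
      | some M, some m => M - m
      | _, _ => 0                   -- unreachable: nums' is nonempty when nums is
  | _, _ => 0                       -- Python raises ValueError on []: excluded by Pre_

-- ===== PORT B =====
def smallestRangeI_alt (nums : List Int) (k : Int) : Int :=
  -- max(nums)/min(nums): Python raises ValueError on [], excluded by Pre_ (getD 0 is unreachable there)
  max ((PySem.List.max? nums (fun y => y)).getD 0 - (PySem.List.min? nums (fun y => y)).getD 0 - 2 * k) 0

-- ===== PRECONDITION & SPEC =====
-- Pre_ excludes the empty list (A raises ValueError in max) and negative k (A's while
-- loop tests membership in an empty set(range(-k,k+1)) and never terminates).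
def Pre_smallestRangeI (nums : List Int) (k : Int) : Prop := nums ≠ [] ∧ 0 ≤ k
instance (nums : List Int) (k : Int) : Decidable (Pre_smallestRangeI nums k) := by unfold Pre_smallestRangeI; infer_instance
def pvWitness_smallestRangeI : List Int × Int := ([1, 5, 2], 1)

def Spec_smallestRangeI (nums : List Int) (k : Int) (out : Int) : Prop := out = smallestRangeI_alt nums k
instance (nums : List Int) (k : Int) (out : Int) : Decidable (Spec_smallestRangeI nums k out) := by unfold Spec_smallestRangeI; infer_instance

-- ===== CLAIM (what is proved, stated in full; the proofs are below) =====
def Claim_equal_smallestRangeI : Prop := ∀ (nums : List Int) (k : Int), Dom_smallestRangeI nums k → Pre_smallestRangeI nums k → Spec_smallestRangeI nums k (smallestRangeI nums k)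

-- ===== LEMMAS AND PROOFS =====

lemma pyWhileA_eval (x t k : Int) (hk : 0 < k) :
    pyWhileA 2 x t k = if t - x > k then x + k else if t - x < -k then x - k else t := by
  simp only [pyWhileA, PySem.List.mem_pyRange_one]
  split_ifs <;> omega

lemma foldl_max_le {c a : Int} {l : List Int} (ha : a ≤ c) (hl : ∀ v ∈ l, v ≤ c) :
    List.foldl max a l ≤ c := by
  induction l generalizing a with
  | nil => simpa using ha
  | cons y ys ih =>
    simp only [List.foldl_cons]
    exact ih (max_le ha (hl y (by simp))) (fun v hv => hl v (by simp [hv]))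

lemma seed_le_foldl_max (a : Int) (l : List Int) : a ≤ List.foldl max a l := by
  induction l generalizing a with
  | nil => simp
  | cons y ys ih => exact le_trans (le_max_left a y) (ih (max a y))

lemma le_foldl_max_of_mem {c a : Int} {l : List Int} (h : c = a ∨ c ∈ l) :
    c ≤ List.foldl max a l := by
  induction l generalizing a with
  | nil =>
    rcases h with h | h
    · simp [h]
    · simp at h
  | cons y ys ih =>
    simp only [List.foldl_cons]
    rcases h with h | h
    · rw [h]; exact le_trans (le_max_left a y) (seed_le_foldl_max _ _)
    · rcases List.mem_cons.mp h with h | h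
      · rw [h]; exact le_trans (le_max_right a y) (seed_le_foldl_max _ _)
      · exact ih (Or.inr h)

lemma foldl_min_ge {c a : Int} {l : List Int} (ha : c ≤ a) (hl : ∀ v ∈ l, c ≤ v) :
    c ≤ List.foldl min a l := by
  induction l generalizing a with
  | nil => simpa using ha
  | cons y ys ih =>
    simp only [List.foldl_cons]
    exact ih (le_min ha (hl y (by simp))) (fun v hv => hl v (by simp [hv]))

lemma foldl_min_le_seed (a : Int) (l : List Int) : List.foldl min a l ≤ a := by
  induction l generalizing a with
  | nil => simp
  | cons y ys ih => exact le_trans (ih (min a y)) (min_le_left a y)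

lemma foldl_min_le_of_mem {c a : Int} {l : List Int} (h : c = a ∨ c ∈ l) :
    List.foldl min a l ≤ c := by
  induction l generalizing a with
  | nil =>
    rcases h with h | h
    · simp [h]
    · simp at h
  | cons y ys ih =>
    simp only [List.foldl_cons]
    rcases h with h | h
    · rw [h]; exact le_trans (foldl_min_le_seed _ _) (min_le_left a y)
    · rcases List.mem_cons.mp h with h | h
      · rw [h]; exact le_trans (foldl_min_le_seed _ _) (min_le_right a y)
      · exact ih (Or.inr h)

-- max?/min? of a nonempty list whose elements are bounded by a member c is some c
lemma max?_eq_of_bound {l : List Int} {x : Int} {t : List Int} {c : Int}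
    (hl : l = x :: t) (hmem : c ∈ l) (hb : ∀ v ∈ l, v ≤ c) :
    PySem.List.max? l (fun y => y) = some c := by
  subst hl
  rw [PySem.List.max?_id_cons]
  congr 1
  have h1 : List.foldl max x t ≤ c := foldl_max_le (hb x (by simp)) (fun v hv => hb v (by simp [hv]))
  have h2 : c ≤ List.foldl max x t := by
    rcases List.mem_cons.mp hmem with h | h
    · exact le_foldl_max_of_mem (Or.inl h)
    · exact le_foldl_max_of_mem (Or.inr h)
  omega

lemma min?_eq_of_bound {l : List Int} {x : Int} {t : List Int} {c : Int}
    (hl : l = x :: t) (hmem : c ∈ l) (hb : ∀ v ∈ l, c ≤ v) :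
    PySem.List.min? l (fun y => y) = some c := by
  subst hl
  rw [PySem.List.min?_id_cons]
  congr 1
  have h1 : c ≤ List.foldl min x t := foldl_min_ge (hb x (by simp)) (fun v hv => hb v (by simp [hv]))
  have h2 : List.foldl min x t ≤ c := by
    rcases List.mem_cons.mp hmem with h | h
    · exact foldl_min_le_of_mem (Or.inl h)
    · exact foldl_min_le_of_mem (Or.inr h)
  omega

-- small-gap case: target never moves, every element becomes t
lemma loopA_small (k t : Int) (hk : 0 < k) :
    ∀ (l : List Int), (∀ x ∈ l, -k ≤ t - x ∧ t - x ≤ k) →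
    loopA k l t = (l.map (fun _ => t), t) := by
  intro l
  induction l with
  | nil => intro _; simp [loopA]
  | cons x rest ih =>
    intro h
    have hx := h x (by simp)
    have ht' : pyWhileA 2 x t k = t := by
      rw [pyWhileA_eval x t k hk]; split_ifs <;> omega
    have hxx : x + (t - x) = t := by omega
    simp only [loopA, ht', List.map_cons]
    rw [ih (fun y hy => h y (by simp [hy]))]
    simp [hxx]

-- big-gap case invariant: every produced value lies in [m+k, M-k], and the extreme
-- elements M and m are rewritten to exactly M-k and m+k
lemma loopA_big (k m M : Int) (hk : 0 < k) :
    ∀ (l : List Int) (t : Int), (∀ x ∈ l, m ≤ x ∧ x ≤ M) → m + k ≤ t → t ≤ M - k →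
    (∀ v ∈ (loopA k l t).1, m + k ≤ v ∧ v ≤ M - k) ∧
    (M ∈ l → (M - k) ∈ (loopA k l t).1) ∧
    (m ∈ l → (m + k) ∈ (loopA k l t).1) := by
  intro l
  induction l with
  | nil => intro t _ _ _; simp [loopA]
  | cons x rest ih =>
    intro t hmem hlo hhi
    have hx := hmem x (by simp)
    set t' := pyWhileA 2 x t k with ht'def
    have heval : t' = if t - x > k then x + k else if t - x < -k then x - k else t := by
      rw [ht'def, pyWhileA_eval x t k hk]
    have ht'lo : m + k ≤ t' := by rw [heval]; split_ifs <;> omega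
    have ht'hi : t' ≤ M - k := by rw [heval]; split_ifs <;> omega
    have hxM : x = M → t' = M - k := by intro hxM; rw [heval]; split_ifs <;> omega
    have hxm : x = m → t' = m + k := by intro hxm; rw [heval]; split_ifs <;> omega
    have hx' : x + (t' - x) = t' := by omega
    obtain ⟨ihb, ihM, ihm⟩ := ih t' (fun y hy => hmem y (by simp [hy])) ht'lo ht'hi
    refine ⟨?_, ?_, ?_⟩
    · intro v hv
      simp only [loopA, List.mem_cons] at hv
      rcases hv with hv | hv
      · rw [hv, hx']; exact ⟨ht'lo, ht'hi⟩
      · exact ihb v hv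
    · intro hM
      simp only [loopA, List.mem_cons]
      rcases List.mem_cons.mp hM with h | h
      · left; rw [hx', hxM h.symm]
      · right; exact ihM h
    · intro hm
      simp only [loopA, List.mem_cons]
      rcases List.mem_cons.mp hm with h | h
      · left; rw [hx', hxm h.symm]
      · right; exact ihm h

lemma loopA_nonnil (k t : Int) (x : Int) (rest : List Int) :
    ∃ y ys, (loopA k (x :: rest) t).1 = y :: ys := by
  simp [loopA]

-- ===== VERDICT (by name: the statement is the Claim_ definition above) =====
theorem smallestRangeI_spec : Claim_equal_smallestRangeI := by
  intro nums k _ hpre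
  obtain ⟨hne, hk0⟩ := hpre
  obtain ⟨x0, rest0, hl⟩ := List.exists_cons_of_ne_nil hne
  obtain ⟨M, hM⟩ : ∃ M, PySem.List.max? nums (fun y => y) = some M := by
    cases h : PySem.List.max? nums (fun y => y) with
    | none => rw [PySem.List.max?_eq_none_iff] at h; exact absurd h hne
    | some v => exact ⟨v, rfl⟩
  obtain ⟨m, hm⟩ : ∃ m, PySem.List.min? nums (fun y => y) = some m := by
    cases h : PySem.List.min? nums (fun y => y) with
    | none => rw [PySem.List.min?_eq_none_iff] at h; exact absurd h hne
    | some v => exact ⟨v, rfl⟩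
  have hMmem : M ∈ nums := PySem.List.max?_mem hM
  have hmmem : m ∈ nums := PySem.List.min?_mem hm
  have hMmax : ∀ y ∈ nums, y ≤ M := fun y hy => PySem.List.max?_isMax hM y hy
  have hmmin : ∀ y ∈ nums, m ≤ y := fun y hy => PySem.List.min?_isMin hm y hy
  have hmM : m ≤ M := hmmin M hMmem
  have hBval : smallestRangeI_alt nums k = max (M - m - 2 * k) 0 := by
    unfold smallestRangeI_alt; rw [hM, hm]; rfl
  unfold Spec_smallestRangeI
  rw [hBval]
  by_cases hk : k = 0
  · have hAval : smallestRangeI nums k = M - m := by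
      unfold smallestRangeI; rw [hM, hm]; simp [hk]
    rw [hAval]; omega
  · have hkpos : 0 < k := lt_of_le_of_ne hk0 (fun h => hk h.symm)
    have hAeq : smallestRangeI nums k =
        (match PySem.List.max? (loopA k nums (PySem.Int.floordiv (M + m) 2)).1 (fun y => y),
               PySem.List.min? (loopA k nums (PySem.Int.floordiv (M + m) 2)).1 (fun y => y) with
         | some M', some m' => M' - m'
         | _, _ => 0) := by
      unfold smallestRangeI; rw [hM, hm]; simp [hk]
    rw [hAeq]
    generalize ht0 : PySem.Int.floordiv (M + m) 2 = t0
    have ht0b : 2 * t0 ≤ M + m ∧ M + m ≤ 2 * t0 + 1 := by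
      rw [← ht0, PySem.Int.floordiv_eq_ediv_of_pos (by norm_num)]
      omega
    by_cases hgap : M - m ≤ 2 * k
    -- all elements collapse to t0; both results are 0
    · have hsmall : ∀ x ∈ nums, -k ≤ t0 - x ∧ t0 - x ≤ k := by
        intro x hx
        have := hMmax x hx
        have := hmmin x hx
        omega
      have hloop := loopA_small k t0 hkpos nums hsmall
      rw [hloop]
      have hmap : nums.map (fun _ => t0) = t0 :: rest0.map (fun _ => t0) := by
        rw [hl]; rfl
      have hmemc : t0 ∈ nums.map (fun _ => t0) := by rw [hmap]; simp
      have hmax' := max?_eq_of_bound hmap hmemc (by intro v hv; simp at hv; omega)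
      have hmin' := min?_eq_of_bound hmap hmemc (by intro v hv; simp at hv; omega)
      rw [hmax', hmin']
      show t0 - t0 = max (M - m - 2 * k) 0
      omega
    -- big gap: extremes become M-k and m+k, everything stays in between
    · have hlo : m + k ≤ t0 := by omega
      have hhi : t0 ≤ M - k := by omega
      obtain ⟨hb, hMk, hmk⟩ := loopA_big k m M hkpos nums t0
        (fun x hx => ⟨hmmin x hx, hMmax x hx⟩) hlo hhi
      obtain ⟨y, ys, hcons⟩ : ∃ y ys, (loopA k nums t0).1 = y :: ys := by
        rw [hl]; exact loopA_nonnil k t0 x0 rest0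
      have hmax' := max?_eq_of_bound hcons (hMk hMmem)
        (by intro v hv; exact (hb v hv).2)
      have hmin' := min?_eq_of_bound hcons (hmk hmmem)
        (by intro v hv; exact (hb v hv).1)
      rw [hmax', hmin']
      show (M - k) - (m + k) = max (M - m - 2 * k) 0
      omega
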